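-- pv_equiv track=rewrite | github.com/GabrielBarberini/EECS | 6-189/cached_rotate_pairs.py | find_rotate_words
-- ===== SOURCE A (Python) =====
-- def rotate(phrase, shift):
--     encoded_phrase = []
--     for letter in phrase:
--         if ord(letter) >= 97\
--         and (ord(letter) - 97) <= 25:
--             cipher = ord(letter)+shift
--
--             while cipher%122 > 0\
--             and cipher%122 != cipher:
--                 cipher = ((96+cipher)%122)
--             encoded_phrase.append(chr(cipher))
--
--         elif ord(letter) >= 65\
--         and (ord(letter) - 65) <= 25:
--             cipher = ord(letter)+shift
--
--             while cipher%90 > 0\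
--             and cipher%90 != cipher:
--                 cipher = ((64+cipher)%90)
--             encoded_phrase.append(chr(cipher))
--
--         else:
--             encoded_phrase.append(letter)
--
--     return ''.join(encoded_phrase)
--
-- def find_rotate_words(words):
--     rotate_words = []
--     cache = {}
--     for word in words:
--         for i in range(1,26):
--             rotated = rotate(word, i)
--             if rotated in words:
--                 cache.setdefault(rotated)
--                 rotate_words.append(word)
--                 break
--     return rotate_words
-- ===== SOURCE B (Python) =====
-- def _canon(word):
--     # shift amount that maps the first alphabetic character to 'a'/'A'; None if no letters
--     s = None
--     for ch in word:
--         if 'a' <= ch <= 'z':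
--             s = (26 - (ord(ch) - 97)) % 26
--             break
--         if 'A' <= ch <= 'Z':
--             s = (26 - (ord(ch) - 65)) % 26
--             break
--     if s is None:
--         return None
--     out = []
--     for ch in word:
--         if 'a' <= ch <= 'z':
--             out.append(chr(97 + (ord(ch) - 97 + s) % 26))
--         elif 'A' <= ch <= 'Z':
--             out.append(chr(65 + (ord(ch) - 65 + s) % 26))
--         else:
--             out.append(ch)
--     return ''.join(out)
--
-- def find_rotate_words(words):
--     groups = {}
--     canons = []
--     for w in words:
--         c = _canon(w)
--         canons.append(c)
--         if c is not None:
--             groups.setdefault(c, set()).add(w)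
--     out = []
--     for w, c in zip(words, canons):
--         if c is None or any(v != w for v in groups[c]):
--             out.append(w)
--     return out
-- ===== Notes on version B (the rewrite author's own statement) =====
-- stated objective: faster
-- what changed: Instead of trying all 25 rotations of every word and scanning the whole list for each (quadratic nested scan), B computes once per word a canonical rotation signature (shift the word so its first letter becomes 'a'/'A'), groups words by signature in a dict, and emits a word iff it has no letters (it matches itself under every shift) or its signature group contains a different word.
import Mathlib
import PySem

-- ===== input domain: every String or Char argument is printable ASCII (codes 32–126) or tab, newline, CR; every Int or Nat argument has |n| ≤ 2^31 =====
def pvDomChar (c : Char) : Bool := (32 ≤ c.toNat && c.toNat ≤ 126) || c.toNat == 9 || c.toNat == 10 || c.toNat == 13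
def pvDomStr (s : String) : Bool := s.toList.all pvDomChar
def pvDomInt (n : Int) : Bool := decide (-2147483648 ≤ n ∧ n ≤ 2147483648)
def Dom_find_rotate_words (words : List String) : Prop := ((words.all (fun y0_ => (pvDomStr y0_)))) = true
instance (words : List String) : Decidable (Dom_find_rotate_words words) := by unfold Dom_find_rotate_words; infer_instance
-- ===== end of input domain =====

-- B replaces A's "try all 25 rotations of each word and scan the whole list for each"
-- nested scan by one grouping pass over a canonical-rotation signature; return values agree.

-- ===== PORT A =====
-- Python's 'while cipher%m > 0 and cipher%m != cipher: cipher = (k+cipher)%m'.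
-- The body maps any integer into [0, m) where the condition is false, so the loop
-- runs at most one iteration from any start; fuel 2 is therefore exact.
def rotLoop : Nat → Int → Int → Int → Int
  | 0, cipher, _, _ => cipher
  | n + 1, cipher, m, k =>
    if PySem.Int.mod cipher m > 0 ∧ PySem.Int.mod cipher m ≠ cipher then
      rotLoop n (PySem.Int.mod (k + cipher) m) m k
    else cipher

def rotate (phrase : String) (shift : Int) : String :=
  String.ofList (phrase.toList.foldl (fun encoded letter =>
    if 97 ≤ letter.toNat ∧ (letter.toNat : Int) - 97 ≤ 25 then
      encoded ++ [Char.ofNat (rotLoop 2 ((letter.toNat : Int) + shift) 122 96).toNat]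
    else if 65 ≤ letter.toNat ∧ (letter.toNat : Int) - 65 ≤ 25 then
      encoded ++ [Char.ofNat (rotLoop 2 ((letter.toNat : Int) + shift) 90 64).toNat]
    else
      encoded ++ [letter]) [])

-- the inner 'for i in range(1,26): if rotate(word,i) in words: …; break' appends word
-- iff some i hits; the local 'cache' dict is write-only (never read into the result)
def find_rotate_words (words : List String) : List String :=
  words.foldl (fun rotate_words word =>
    if (PySem.List.pyRange 1 26 1).any (fun i => words.contains (rotate word i)) then
      rotate_words ++ [word]
    else rotate_words) []

-- ===== PORT B =====
-- shift amount that maps the first alphabetic character to 'a'/'A'; none if no letters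
def canonShift : List Char → Option Int
  | [] => none
  | c :: rest =>
    if 97 ≤ c.toNat ∧ c.toNat ≤ 122 then some (PySem.Int.mod (26 - ((c.toNat : Int) - 97)) 26)
    else if 65 ≤ c.toNat ∧ c.toNat ≤ 90 then some (PySem.Int.mod (26 - ((c.toNat : Int) - 65)) 26)
    else canonShift rest

def shiftChar (s : Int) (c : Char) : Char :=
  if 97 ≤ c.toNat ∧ c.toNat ≤ 122 then
    Char.ofNat (97 + PySem.Int.mod ((c.toNat : Int) - 97 + s) 26).toNat
  else if 65 ≤ c.toNat ∧ c.toNat ≤ 90 then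
    Char.ofNat (65 + PySem.Int.mod ((c.toNat : Int) - 65 + s) 26).toNat
  else c

def canon (word : String) : Option String :=
  (canonShift word.toList).map (fun s => String.ofList (word.toList.map (shiftChar s)))

def find_rotate_words_alt (words : List String) : List String :=
  let st := words.foldl
    (fun (st : List (Option String) × PySem.Dict String (PySem.Set String)) w =>
      let c := canon w
      (st.1 ++ [c],
        match c with
        | none => st.2
        | some cv => st.2.modify cv PySem.Set.empty (fun s => PySem.Set.add s w)))
    ([], PySem.Dict.empty)
  (words.zip st.1).foldl (fun out wc =>
    match wc.2 with
    | none => out ++ [wc.1]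
    | some cv =>
      if (PySem.Dict.getD st.2 cv PySem.Set.empty).any (fun v => v != wc.1) then
        out ++ [wc.1]
      else out) []

-- ===== PRECONDITION & SPEC =====
def Spec_find_rotate_words (words : List String) (out : List String) : Prop := out = find_rotate_words_alt words
instance (words : List String) (out : List String) : Decidable (Spec_find_rotate_words words out) := by unfold Spec_find_rotate_words; infer_instance

-- ===== CLAIM (what is proved, stated in full; the proofs are below) =====
def Claim_equal_find_rotate_words : Prop := ∀ (words : List String), Dom_find_rotate_words words → Spec_find_rotate_words words (find_rotate_words words)

-- ===== LEMMAS AND PROOFS =====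

-- abbreviations used only in proofs
def lowerC (c : Char) : Prop := 97 ≤ c.toNat ∧ c.toNat ≤ 122
def upperC (c : Char) : Prop := 65 ≤ c.toNat ∧ c.toNat ≤ 90

lemma char_eq_of_toNat (a b : Char) (h : a.toNat = b.toNat) : a = b := by
  have := congrArg Char.ofNat h
  rwa [Char.ofNat_toNat, Char.ofNat_toNat] at this

lemma emod26 (x : Int) : 0 ≤ x % 26 ∧ x % 26 < 26 :=
  ⟨Int.emod_nonneg x (by norm_num), Int.emod_lt_of_pos x (by norm_num)⟩

lemma toNat_ofNat' (n : Nat) (h : n < 55296) : (Char.ofNat n).toNat = n := by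
  unfold Char.ofNat
  split
  · rfl
  · rename_i hv; exact absurd (Or.inl (by omega)) hv

lemma shiftChar_lower (s : Int) (c : Char) (h : lowerC c) :
    ((shiftChar s c).toNat : Int) = 97 + ((c.toNat : Int) - 97 + s) % 26 := by
  unfold lowerC at h
  unfold shiftChar
  rw [if_pos h, PySem.Int.mod_eq_emod_of_pos (by norm_num : (0:Int) < 26)]
  rw [toNat_ofNat' _ (by omega)]
  omega

lemma shiftChar_upper (s : Int) (c : Char) (h : upperC c) :
    ((shiftChar s c).toNat : Int) = 65 + ((c.toNat : Int) - 65 + s) % 26 := by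
  unfold upperC at h
  unfold shiftChar
  have hn : ¬ (97 ≤ c.toNat ∧ c.toNat ≤ 122) := by omega
  rw [if_neg hn, if_pos h, PySem.Int.mod_eq_emod_of_pos (by norm_num : (0:Int) < 26)]
  rw [toNat_ofNat' _ (by omega)]
  omega

lemma shiftChar_other (s : Int) (c : Char) (h1 : ¬ lowerC c) (h2 : ¬ upperC c) :
    shiftChar s c = c := by
  unfold lowerC at h1; unfold upperC at h2
  unfold shiftChar
  rw [if_neg h1, if_neg h2]

lemma shiftChar_lower_iff (s : Int) (c : Char) : lowerC (shiftChar s c) ↔ lowerC c := by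
  constructor
  · intro h
    by_contra hnl
    by_cases hu : upperC c
    · have h1 := shiftChar_upper s c hu
      have h2 := emod26 ((c.toNat : Int) - 65 + s)
      unfold lowerC at h; unfold upperC at hu; omega
    · rw [shiftChar_other s c hnl hu] at h; exact hnl h
  · intro hl
    have h1 := shiftChar_lower s c hl
    have h2 := emod26 ((c.toNat : Int) - 97 + s)
    unfold lowerC; omega

lemma shiftChar_upper_iff (s : Int) (c : Char) : upperC (shiftChar s c) ↔ upperC c := by
  constructor
  · intro h
    by_contra hnu
    by_cases hl : lowerC c
    · have h1 := shiftChar_lower s c hl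
      have h2 := emod26 ((c.toNat : Int) - 97 + s)
      unfold upperC at h; unfold lowerC at hl; omega
    · rw [shiftChar_other s c hl hnu] at h; exact hnu h
  · intro hu
    have h1 := shiftChar_upper s c hu
    have h2 := emod26 ((c.toNat : Int) - 65 + s)
    unfold upperC; omega

lemma shiftChar_comp (a b : Int) (c : Char) :
    shiftChar a (shiftChar b c) = shiftChar (a + b) c := by
  by_cases hl : lowerC c
  · have hbc : lowerC (shiftChar b c) := (shiftChar_lower_iff b c).mpr hl
    apply char_eq_of_toNat
    have h1 := shiftChar_lower a (shiftChar b c) hbc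
    have h2 := shiftChar_lower b c hl
    have h3 := shiftChar_lower (a + b) c hl
    omega
  · by_cases hu : upperC c
    · have hbc : upperC (shiftChar b c) := (shiftChar_upper_iff b c).mpr hu
      apply char_eq_of_toNat
      have h1 := shiftChar_upper a (shiftChar b c) hbc
      have h2 := shiftChar_upper b c hu
      have h3 := shiftChar_upper (a + b) c hu
      omega
    · rw [shiftChar_other b c hl hu, shiftChar_other a c hl hu, shiftChar_other (a + b) c hl hu]

lemma shiftChar_congr_mod (s t : Int) (c : Char) (h : s % 26 = t % 26) :
    shiftChar s c = shiftChar t c := by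
  by_cases hl : lowerC c
  · apply char_eq_of_toNat
    have h1 := shiftChar_lower s c hl
    have h2 := shiftChar_lower t c hl
    omega
  · by_cases hu : upperC c
    · apply char_eq_of_toNat
      have h1 := shiftChar_upper s c hu
      have h2 := shiftChar_upper t c hu
      omega
    · rw [shiftChar_other s c hl hu, shiftChar_other t c hl hu]

lemma shiftChar_zero (c : Char) : shiftChar 0 c = c := by
  by_cases hl : lowerC c
  · apply char_eq_of_toNat
    have h1 := shiftChar_lower 0 c hl
    unfold lowerC at hl; omega
  · by_cases hu : upperC c
    · apply char_eq_of_toNat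
      have h1 := shiftChar_upper 0 c hu
      unfold upperC at hu; omega
    · exact shiftChar_other 0 c hl hu

lemma shiftChar_ne (i : Int) (c : Char) (hi : 1 ≤ i ∧ i ≤ 25) (h : lowerC c ∨ upperC c) :
    shiftChar i c ≠ c := by
  intro heq
  have ht := congrArg Char.toNat heq
  rcases h with hl | hu
  · have h1 := shiftChar_lower i c hl
    unfold lowerC at hl; omega
  · have h1 := shiftChar_upper i c hu
    unfold upperC at hu; omega

lemma map_shiftChar_comp (a b : Int) (l : List Char) :
    (l.map (shiftChar b)).map (shiftChar a) = l.map (shiftChar (a + b)) := by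
  rw [List.map_map]
  exact List.map_congr_left (fun c _ => shiftChar_comp a b c)

lemma map_shiftChar_congr_mod (s t : Int) (l : List Char) (h : s % 26 = t % 26) :
    l.map (shiftChar s) = l.map (shiftChar t) := by
  exact List.map_congr_left (fun c _ => shiftChar_congr_mod s t c h)

lemma map_shiftChar_zero (l : List Char) : l.map (shiftChar 0) = l := by
  have h : l.map (shiftChar 0) = l.map id := List.map_congr_left (fun c _ => shiftChar_zero c)
  simpa using h

lemma canonShift_none_iff (l : List Char) :
    canonShift l = none ↔ ∀ c ∈ l, ¬ lowerC c ∧ ¬ upperC c := by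
  induction l with
  | nil => simp [canonShift]
  | cons c r ih =>
    unfold canonShift
    split_ifs with h1 h2
    · constructor
      · intro h; simp at h
      · intro h
        have := (h c (List.mem_cons_self)).1
        unfold lowerC at this; exact absurd h1 this
    · constructor
      · intro h; simp at h
      · intro h
        have := (h c (List.mem_cons_self)).2
        unfold upperC at this; exact absurd h2 this
    · rw [ih]
      constructor
      · intro h c' hc'
        rcases List.mem_cons.mp hc' with rfl | hm
        · exact ⟨by unfold lowerC; exact h1, by unfold upperC; exact h2⟩
        · exact h c' hm
      · intro h c' hc'
        exact h c' (List.mem_cons_of_mem c hc')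

lemma canonShift_bounds (l : List Char) (s : Int) (h : canonShift l = some s) :
    0 ≤ s ∧ s < 26 := by
  induction l with
  | nil => simp [canonShift] at h
  | cons c r ih =>
    unfold canonShift at h
    split_ifs at h with h1 h2
    · rw [PySem.Int.mod_eq_emod_of_pos (by norm_num : (0:Int) < 26)] at h
      simp only [Option.some.injEq] at h
      have := emod26 (26 - ((c.toNat : Int) - 97))
      omega
    · rw [PySem.Int.mod_eq_emod_of_pos (by norm_num : (0:Int) < 26)] at h
      simp only [Option.some.injEq] at h
      have := emod26 (26 - ((c.toNat : Int) - 65))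
      omega
    · exact ih h

lemma canonShift_map (i : Int) (l : List Char) :
    canonShift (l.map (shiftChar i)) = (canonShift l).map (fun s => (s - i) % 26) := by
  induction l with
  | nil => simp [canonShift]
  | cons c r ih =>
    by_cases hl : lowerC c
    · have hsc : lowerC (shiftChar i c) := (shiftChar_lower_iff i c).mpr hl
      have ht := shiftChar_lower i c hl
      unfold lowerC at hl hsc
      simp only [List.map_cons]
      unfold canonShift
      rw [if_pos hsc, if_pos hl]
      simp only [Option.map_some]
      congr 1
      rw [PySem.Int.mod_eq_emod_of_pos (by norm_num : (0:Int) < 26),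
          PySem.Int.mod_eq_emod_of_pos (by norm_num : (0:Int) < 26)]
      omega
    · by_cases hu : upperC c
      · have hsc : upperC (shiftChar i c) := (shiftChar_upper_iff i c).mpr hu
        have hsl : ¬ lowerC (shiftChar i c) := fun hx => hl ((shiftChar_lower_iff i c).mp hx)
        have ht := shiftChar_upper i c hu
        unfold lowerC at hsl hl
        unfold upperC at hu hsc
        simp only [List.map_cons]
        unfold canonShift
        rw [if_neg hsl, if_pos hsc, if_neg (by omega : ¬ (97 ≤ c.toNat ∧ c.toNat ≤ 122)), if_pos hu]
        simp only [Option.map_some]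
        congr 1
        rw [PySem.Int.mod_eq_emod_of_pos (by norm_num : (0:Int) < 26),
            PySem.Int.mod_eq_emod_of_pos (by norm_num : (0:Int) < 26)]
        omega
      · have heq := shiftChar_other i c hl hu
        unfold lowerC at hl; unfold upperC at hu
        simp only [List.map_cons]
        unfold canonShift
        rw [heq, if_neg hl, if_neg hu, if_neg hl, if_neg hu]
        exact ih

-- A's per-character branch as a function
def rotC (shift : Int) (letter : Char) : Char :=
  if 97 ≤ letter.toNat ∧ (letter.toNat : Int) - 97 ≤ 25 then
    Char.ofNat (rotLoop 2 ((letter.toNat : Int) + shift) 122 96).toNat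
  else if 65 ≤ letter.toNat ∧ (letter.toNat : Int) - 65 ≤ 25 then
    Char.ofNat (rotLoop 2 ((letter.toNat : Int) + shift) 90 64).toNat
  else letter

lemma rotate_eq_map (w : String) (i : Int) :
    rotate w i = String.ofList (w.toList.map (rotC i)) := by
  unfold rotate
  have hb : (fun (encoded : List Char) letter =>
      if 97 ≤ letter.toNat ∧ (letter.toNat : Int) - 97 ≤ 25 then
        encoded ++ [Char.ofNat (rotLoop 2 ((letter.toNat : Int) + i) 122 96).toNat]
      else if 65 ≤ letter.toNat ∧ (letter.toNat : Int) - 65 ≤ 25 then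
        encoded ++ [Char.ofNat (rotLoop 2 ((letter.toNat : Int) + i) 90 64).toNat]
      else encoded ++ [letter])
      = (fun encoded letter => encoded ++ [rotC i letter]) := by
    funext acc c
    unfold rotC
    split_ifs <;> rfl
  rw [hb, PySem.List.foldl_append_singleton_eq_map]
  simp

lemma rotC_eq_shiftChar (i : Int) (c : Char) (hi : 1 ≤ i ∧ i ≤ 25) :
    rotC i c = shiftChar i c := by
  by_cases hl : lowerC c
  · have hc : 97 ≤ c.toNat ∧ (c.toNat : Int) - 97 ≤ 25 := by unfold lowerC at hl; omega
    unfold rotC shiftChar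
    rw [if_pos hc, if_pos (by unfold lowerC at hl; exact hl)]
    congr 1
    have hloop : rotLoop 2 ((c.toNat : Int) + i) 122 96 = 97 + ((c.toNat : Int) - 97 + i) % 26 := by
      unfold lowerC at hl
      simp only [rotLoop, PySem.Int.mod_eq_emod_of_pos (by norm_num : (0:Int) < 122)]
      split_ifs <;> omega
    rw [hloop, PySem.Int.mod_eq_emod_of_pos (by norm_num : (0:Int) < 26)]
  · by_cases hu : upperC c
    · have hc : 65 ≤ c.toNat ∧ (c.toNat : Int) - 65 ≤ 25 := by unfold upperC at hu; omega
      have hnc : ¬ (97 ≤ c.toNat ∧ (c.toNat : Int) - 97 ≤ 25) := by unfold upperC at hu; omega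
      unfold rotC shiftChar
      rw [if_neg hnc, if_pos hc,
          if_neg (by unfold lowerC at hl; exact hl), if_pos (by unfold upperC at hu; exact hu)]
      congr 1
      have hloop : rotLoop 2 ((c.toNat : Int) + i) 90 64 = 65 + ((c.toNat : Int) - 65 + i) % 26 := by
        unfold upperC at hu
        simp only [rotLoop, PySem.Int.mod_eq_emod_of_pos (by norm_num : (0:Int) < 90)]
        split_ifs <;> omega
      rw [hloop, PySem.Int.mod_eq_emod_of_pos (by norm_num : (0:Int) < 26)]
    · have h1 : ¬ (97 ≤ c.toNat ∧ (c.toNat : Int) - 97 ≤ 25) := by unfold lowerC at hl; omega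
      have h2 : ¬ (65 ≤ c.toNat ∧ (c.toNat : Int) - 65 ≤ 25) := by unfold upperC at hu; omega
      unfold rotC
      rw [if_neg h1, if_neg h2, shiftChar_other i c hl hu]

lemma rotate_eq_map_shiftChar (w : String) (i : Int) (hi : 1 ≤ i ∧ i ≤ 25) :
    rotate w i = String.ofList (w.toList.map (shiftChar i)) := by
  rw [rotate_eq_map]
  congr 1
  exact List.map_congr_left (fun c _ => rotC_eq_shiftChar i c hi)

-- B's inclusion test as a predicate over the full word list
def qB (words : List String) (w : String) : Bool :=
  match canon w with
  | none => true
  | some cv => (words.filter (fun v => canon v == some cv)).any (fun v => v != w)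

-- A's inclusion test
def pA (words : List String) (w : String) : Bool :=
  (PySem.List.pyRange 1 26 1).any (fun i => words.contains (rotate w i))

lemma map_eq_self_mem {f : Char → Char} {l : List Char} (h : l.map f = l) :
    ∀ c ∈ l, f c = c := by
  induction l with
  | nil => intro c hc; cases hc
  | cons a r ih =>
    simp only [List.map_cons, List.cons.injEq] at h
    intro c hc
    rcases List.mem_cons.mp hc with rfl | hm
    · exact h.1
    · exact ih h.2 c hm

lemma string_eq_of_toList {s t : String} (h : s.toList = t.toList) : s = t := by
  have := congrArg String.ofList h
  rwa [String.ofList_toList, String.ofList_toList] at this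

lemma zip_map_canon (words : List String) :
    words.zip (words.map canon) = words.map (fun w => (w, canon w)) := by
  induction words with
  | nil => rfl
  | cons w ws ih => simp [ih]

lemma any_set_ofList (xs : List String) (p : String → Bool) :
    (xs.foldl PySem.Set.add PySem.Set.empty).any p = xs.any p := by
  have h1 : xs.foldl PySem.Set.add PySem.Set.empty = PySem.Set.ofList xs :=
    (PySem.Set.ofList_eq_foldl xs).symm
  rw [h1, Bool.eq_iff_iff]
  simp only [List.any_eq_true]
  constructor
  · rintro ⟨x, hx, hp⟩
    exact ⟨x, (PySem.Set.mem_ofList xs x).mp hx, hp⟩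
  · rintro ⟨x, hx, hp⟩
    exact ⟨x, (PySem.Set.mem_ofList xs x).mpr hx, hp⟩

lemma find_A_filter (words : List String) :
    find_rotate_words words = words.filter (pA words) := by
  unfold find_rotate_words
  rw [show (fun (rotate_words : List String) (word : String) =>
        if (PySem.List.pyRange 1 26 1).any (fun i => words.contains (rotate word i)) then
          rotate_words ++ [word]
        else rotate_words)
      = (fun acc w => if pA words w then acc ++ [w] else acc) from rfl]
  rw [PySem.List.foldl_append_if_eq_filter]
  simp

lemma groups_getD (ws : List String) (cs : List (Option String))
    (g : PySem.Dict String (PySem.Set String)) (c : String) :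
    ((ws.foldl (fun (st : List (Option String) × PySem.Dict String (PySem.Set String)) w =>
      (st.1 ++ [canon w],
        match canon w with
        | none => st.2
        | some cv => st.2.modify cv PySem.Set.empty (fun s => PySem.Set.add s w))) (cs, g)).2).getD c PySem.Set.empty
    = (ws.filter (fun v => canon v == some c)).foldl PySem.Set.add (g.getD c PySem.Set.empty) := by
  induction ws generalizing cs g with
  | nil => simp
  | cons w ws ih =>
    cases hc : canon w with
    | none =>
      simp only [List.foldl_cons, hc]
      rw [ih]
      simp [hc]
    | some cv =>
      simp only [List.foldl_cons, hc]
      rw [ih, PySem.Dict.getD_modify]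
      by_cases hcc : c = cv
      · subst hcc
        simp [hc]
      · simp [hc, hcc, Ne.symm hcc]

lemma groups_fst (ws : List String) (cs : List (Option String))
    (g : PySem.Dict String (PySem.Set String)) :
    ((ws.foldl (fun (st : List (Option String) × PySem.Dict String (PySem.Set String)) w =>
      (st.1 ++ [canon w],
        match canon w with
        | none => st.2
        | some cv => st.2.modify cv PySem.Set.empty (fun s => PySem.Set.add s w))) (cs, g)).1)
    = cs ++ ws.map canon := by
  induction ws generalizing cs g with
  | nil => simp
  | cons w ws ih =>
    simp only [List.foldl_cons]
    rw [ih]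
    simp

lemma find_B_filter (words : List String) :
    find_rotate_words_alt words = words.filter (qB words) := by
  unfold find_rotate_words_alt
  simp only [groups_fst, groups_getD, PySem.Dict.getD_empty, List.nil_append]
  rw [zip_map_canon, List.foldl_map]
  have hbody : (fun (out : List String) (w : String) =>
      match ((fun w => (w, canon w)) w).2 with
      | none => out ++ [w]
      | some cv =>
        if ((words.filter (fun v => canon v == some cv)).foldl PySem.Set.add
              PySem.Set.empty).any (fun v => v != w) then
          out ++ [w]
        else out)
      = (fun out w => if qB words w then out ++ [w] else out) := by
    funext out w
    simp only []
    unfold qB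
    cases hc : canon w with
    | none => simp
    | some cv => simp only [any_set_ofList]
  rw [hbody, PySem.List.foldl_append_if_eq_filter]
  simp

lemma pA_iff (words : List String) (w : String) :
    pA words w = true ↔ ∃ i : Int, 1 ≤ i ∧ i < 26 ∧ rotate w i ∈ words := by
  unfold pA
  rw [List.any_eq_true]
  constructor
  · rintro ⟨i, hi, hc⟩
    rw [PySem.List.mem_pyRange_one] at hi
    exact ⟨i, hi.1, hi.2, by simpa using hc⟩
  · rintro ⟨i, h1, h2, h3⟩
    exact ⟨i, by rw [PySem.List.mem_pyRange_one]; exact ⟨h1, h2⟩, by simpa using h3⟩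

lemma qB_iff (words : List String) (w : String) :
    qB words w = true ↔
      (canon w = none ∨ ∃ v ∈ words, canon v = canon w ∧ v ≠ w) := by
  unfold qB
  cases hc : canon w with
  | none => simp
  | some cv =>
    rw [List.any_eq_true]
    constructor
    · rintro ⟨v, hv, hne⟩
      rw [List.mem_filter] at hv
      right
      refine ⟨v, hv.1, ?_, by simpa using hne⟩
      have := hv.2
      simpa using this
    · rintro (h | ⟨v, hv, hcv, hne⟩)
      · exact absurd h (by simp)
      · exact ⟨v, List.mem_filter.mpr ⟨hv, by simp [hcv]⟩, by simpa using hne⟩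

lemma key_iff (words : List String) (w : String) (hw : w ∈ words) :
    (∃ i : Int, 1 ≤ i ∧ i < 26 ∧ rotate w i ∈ words) ↔
      (canon w = none ∨ ∃ v ∈ words, canon v = canon w ∧ v ≠ w) := by
  by_cases hn : canonShift w.toList = none
  · constructor
    · intro _
      left
      unfold canon
      rw [hn]
      rfl
    · intro _
      refine ⟨1, by norm_num, by norm_num, ?_⟩
      have hfix : rotate w 1 = w := by
        rw [rotate_eq_map_shiftChar w 1 (by norm_num)]
        have hall := (canonShift_none_iff w.toList).mp hn
        have h2 : w.toList.map (shiftChar 1) = w.toList.map id :=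
          List.map_congr_left (fun c hcmem =>
            shiftChar_other 1 c (hall c hcmem).1 (hall c hcmem).2)
        rw [h2, List.map_id, String.ofList_toList]
      rw [hfix]
      exact hw
  · obtain ⟨sw, hsw⟩ : ∃ s, canonShift w.toList = some s := by
      cases hcs : canonShift w.toList with
      | none => exact absurd hcs hn
      | some s => exact ⟨s, rfl⟩
    have hswb := canonShift_bounds _ _ hsw
    have hcw : canon w = some (String.ofList (w.toList.map (shiftChar sw))) := by
      unfold canon
      rw [hsw]
      rfl
    constructor
    · rintro ⟨i, hi1, hi2, hmem⟩
      right
      refine ⟨rotate w i, hmem, ?_, ?_⟩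
      · rw [rotate_eq_map_shiftChar w i ⟨hi1, by omega⟩]
        unfold canon
        rw [String.toList_ofList, canonShift_map, hsw]
        simp only [Option.map_some]
        congr 1
        congr 1
        rw [map_shiftChar_comp]
        apply map_shiftChar_congr_mod
        omega
      · intro heq
        rw [rotate_eq_map_shiftChar w i ⟨hi1, by omega⟩] at heq
        have hlist : w.toList.map (shiftChar i) = w.toList := by
          have := congrArg String.toList heq
          rwa [String.toList_ofList] at this
        have hex : ∃ c ∈ w.toList, lowerC c ∨ upperC c := by
          by_contra hno
          push Not at hno
          apply hn
          rw [canonShift_none_iff]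
          intro c hcm
          exact hno c hcm
        obtain ⟨c, hcm, hcl⟩ := hex
        exact shiftChar_ne i c ⟨hi1, by omega⟩ hcl (map_eq_self_mem hlist c hcm)
    · rintro (h | ⟨v, hv, hcv, hvne⟩)
      · rw [hcw] at h
        simp at h
      · rw [hcw] at hcv
        obtain ⟨sv, hsv⟩ : ∃ s, canonShift v.toList = some s := by
          cases hcsv : canonShift v.toList with
          | none =>
            rw [show canon v = none from by unfold canon; rw [hcsv]; rfl] at hcv
            simp at hcv
          | some s => exact ⟨s, rfl⟩
        have hsvb := canonShift_bounds _ _ hsv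
        have hvmap : v.toList.map (shiftChar sv) = w.toList.map (shiftChar sw) := by
          unfold canon at hcv
          rw [hsv] at hcv
          simp only [Option.map_some, Option.some.injEq] at hcv
          have := congrArg String.toList hcv
          rwa [String.toList_ofList, String.toList_ofList] at this
        have hv1 : v.toList = w.toList.map (shiftChar ((26 - sv) + sw)) := by
          have e1 : v.toList.map (shiftChar ((26 - sv) + sv)) = v.toList := by
            have : v.toList.map (shiftChar ((26 - sv) + sv)) = v.toList.map (shiftChar 0) :=
              map_shiftChar_congr_mod _ _ _ (by omega)
            rw [this, map_shiftChar_zero]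
          calc v.toList = v.toList.map (shiftChar ((26 - sv) + sv)) := e1.symm
            _ = (v.toList.map (shiftChar sv)).map (shiftChar (26 - sv)) :=
                (map_shiftChar_comp _ _ _).symm
            _ = (w.toList.map (shiftChar sw)).map (shiftChar (26 - sv)) := by rw [hvmap]
            _ = w.toList.map (shiftChar ((26 - sv) + sw)) := map_shiftChar_comp _ _ _
        have hj : v.toList = w.toList.map (shiftChar (((26 - sv) + sw) % 26)) := by
          rw [hv1]
          exact map_shiftChar_congr_mod _ _ _ (by omega)
        have hjb := emod26 ((26 - sv) + sw)
        by_cases hj0 : ((26 - sv) + sw) % 26 = 0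
        · exfalso
          apply hvne
          apply string_eq_of_toList
          rw [hj, hj0, map_shiftChar_zero]
        · refine ⟨((26 - sv) + sw) % 26, by omega, by omega, ?_⟩
          rw [rotate_eq_map_shiftChar w _ ⟨by omega, by omega⟩, ← hj, String.ofList_toList]
          exact hv

-- ===== VERDICT (by name: the statement is the Claim_ definition above) =====
theorem find_rotate_words_spec : Claim_equal_find_rotate_words := by
  intro words _
  unfold Spec_find_rotate_words
  rw [find_A_filter, find_B_filter]
  apply List.filter_congr
  intro w hw
  have hiff : pA words w = true ↔ qB words w = true :=
    (pA_iff words w).trans ((key_iff words w hw).trans (qB_iff words w).symm)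
  cases hA : pA words w <;> cases hB : qB words w <;> simp_all
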